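-- pv_equiv track=rewrite | github.com/locbp-uzh/biopipelines | biopipelines/sele_utils.py | chain_aware_sele
-- ===== SOURCE A (Python) =====
-- def chain_aware_sele(residues):
--     """Convert list of (chain, resnum) tuples to compact chain-aware selection string.
--
--     Examples:
--         [('A',1),('A',2),('A',3),('B',10)] -> 'A1-3+B10'
--         [('A',1),('A',3),('B',5)]          -> 'A1+A3+B5'
--     """
--     if not residues:
--         return ""
--
--     # Group by chain, preserving order of first appearance
--     chain_order = []
--     by_chain = {}
--     for chain, resnum in residues:
--         if chain not in by_chain:
--             chain_order.append(chain)
--             by_chain[chain] = []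
--         by_chain[chain].append(resnum)
--
--     parts = []
--     for chain in chain_order:
--         nums = sorted(by_chain[chain])
--         i = 0
--         while i < len(nums):
--             start = nums[i]
--             j = i + 1
--             while j < len(nums) and nums[j] == nums[j - 1] + 1:
--                 j += 1
--             end = nums[j - 1]
--             if end > start:
--                 parts.append(f"{chain}{start}-{end}")
--             else:
--                 parts.append(f"{chain}{start}")
--             i = j
--
--     return "+".join(parts)
-- ===== SOURCE B (Python) =====
-- from itertools import groupby
--
--
-- def chain_aware_sele(residues):
--     """Convert list of (chain, resnum) tuples to compact chain-aware selection string."""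
--     by_chain = {}
--     for chain, resnum in residues:
--         by_chain[chain] = by_chain.get(chain, []) + [resnum]
--
--     parts = []
--     for chain, nums in by_chain.items():
--         for _, grp in groupby(enumerate(sorted(nums)), key=lambda p: p[1] - p[0]):
--             vals = [v for _, v in grp]
--             if vals[-1] > vals[0]:
--                 parts.append(f"{chain}{vals[0]}-{vals[-1]}")
--             else:
--                 parts.append(f"{chain}{vals[0]}")
--     return "+".join(parts)
-- ===== Notes on version B (the rewrite author's own statement) =====
-- stated objective: idiomatic
-- what changed: Replaces the hand-written double while-loop index scan for consecutive runs with itertools.groupby over enumerate(sorted(nums)) keyed by value-index, and drops the separate chain-order list by relying on dict insertion order.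
import Mathlib
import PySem

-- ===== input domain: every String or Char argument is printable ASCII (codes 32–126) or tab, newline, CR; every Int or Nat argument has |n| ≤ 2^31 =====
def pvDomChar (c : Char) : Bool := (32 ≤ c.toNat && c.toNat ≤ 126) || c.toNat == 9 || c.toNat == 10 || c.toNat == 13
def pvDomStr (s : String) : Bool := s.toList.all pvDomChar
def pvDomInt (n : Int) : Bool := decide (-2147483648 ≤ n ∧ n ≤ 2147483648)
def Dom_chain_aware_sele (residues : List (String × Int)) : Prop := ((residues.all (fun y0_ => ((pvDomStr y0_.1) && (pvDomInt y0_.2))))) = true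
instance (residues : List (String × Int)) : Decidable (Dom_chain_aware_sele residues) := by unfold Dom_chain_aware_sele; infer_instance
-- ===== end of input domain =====

-- B replaces A's index-based while-loop run scan by a groupby over (value - index)
-- keys and drops A's separate chain-order list in favour of dict insertion order
-- (objective: idiomatic; same asymptotic cost).

-- ===== PORT A =====
-- inner while loop: j += 1 while j < len and nums[j] == nums[j-1] + 1;
-- both indexings are in range in Python, so getD _ 0 is exact
def scanRunA (nums : List Int) (j : Nat) : Nat :=
  if _h : j < nums.length ∧ nums.getD j 0 = nums.getD (j - 1) 0 + 1 then
    scanRunA nums (j + 1)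
  else j
termination_by nums.length - j

-- needed for termination of runsA (the outer while advances i to j > i)
theorem le_scanRunA (nums : List Int) (j : Nat) : j ≤ scanRunA nums j := by
  unfold scanRunA
  split
  · exact Nat.le_trans (Nat.le_succ j) (le_scanRunA nums (j + 1))
  · exact Nat.le_refl j
termination_by nums.length - j

-- outer while loop over i (start = nums[i], end = nums[j-1]; in range, getD _ 0 exact)
def runsA (chain : String) (nums : List Int) (i : Nat) : List String :=
  if _h : i < nums.length then
    let start := nums.getD i 0
    let j := scanRunA nums (i + 1)
    let e := nums.getD (j - 1) 0
    (if e > start then chain ++ PySem.Int.toStr start ++ "-" ++ PySem.Int.toStr e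
     else chain ++ PySem.Int.toStr start) :: runsA chain nums j
  else []
termination_by nums.length - i
decreasing_by
  have := le_scanRunA nums (i + 1)
  omega

-- the chain-grouping loop: state = (chain_order, by_chain)
def stepA (s : List String × PySem.Dict String (List Int)) (p : String × Int) :
    List String × PySem.Dict String (List Int) :=
  let s := if s.2.contains p.1 then s else (s.1 ++ [p.1], s.2.insert p.1 [])
  (s.1, s.2.insert p.1 (s.2.getD p.1 [] ++ [p.2]))

def chain_aware_sele (residues : List (String × Int)) : String :=
  if residues = [] then ""
  else
    let st := residues.foldl stepA ([], PySem.Dict.empty)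
    let parts := st.1.foldl
      (fun parts c => parts ++ runsA c (PySem.List.sorted (st.2.getD c []) (fun x => x) false) 0) []
    PySem.Str.join "+" parts

-- ===== PORT B =====
-- itertools.groupby(enumerate(sorted(nums)), key = value - index): gbAuxB accumulates
-- the current group's values (reversed), starting a new group when the key changes
def gbAuxB (k : Int) (acc : List Int) : List (Int × Int) → List (List Int)
  | [] => [acc.reverse]
  | (i, v) :: rest =>
      if v - i = k then gbAuxB k (v :: acc) rest
      else acc.reverse :: gbAuxB (v - i) [v] rest

def gbB : List (Int × Int) → List (List Int)
  | [] => []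
  | (i, v) :: rest => gbAuxB (v - i) [v] rest

-- format one group; groups are nonempty, so headD/getLastD 0 are exact for vals[0]/vals[-1]
def fmtRunB (chain : String) (vals : List Int) : String :=
  let s := vals.headD 0
  let e := vals.getLastD 0
  if e > s then chain ++ PySem.Int.toStr s ++ "-" ++ PySem.Int.toStr e
  else chain ++ PySem.Int.toStr s

def stepB (d : PySem.Dict String (List Int)) (p : String × Int) :
    PySem.Dict String (List Int) :=
  d.insert p.1 (d.getD p.1 [] ++ [p.2])

def chain_aware_sele_alt (residues : List (String × Int)) : String :=
  let d := residues.foldl stepB PySem.Dict.empty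
  PySem.Str.join "+" (d.items.foldl
    (fun parts p =>
      parts ++ (gbB (PySem.List.enumerate (PySem.List.sorted p.2 (fun x => x) false) 0)).map (fmtRunB p.1)) [])

-- ===== PRECONDITION & SPEC =====
def Spec_chain_aware_sele (residues : List (String × Int)) (out : String) : Prop := out = chain_aware_sele_alt residues
instance (residues : List (String × Int)) (out : String) : Decidable (Spec_chain_aware_sele residues out) := by unfold Spec_chain_aware_sele; infer_instance

-- ===== CLAIM (what is proved, stated in full; the proofs are below) =====
def Claim_equal_chain_aware_sele : Prop := ∀ (residues : List (String × Int)), Dom_chain_aware_sele residues → Spec_chain_aware_sele residues (chain_aware_sele residues)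

-- ===== LEMMAS AND PROOFS =====

-- length of the maximal +1-consecutive run continuing value p
def chainLen : Int → List Int → Nat
  | _, [] => 0
  | p, v :: rest => if v = p + 1 then chainLen v rest + 1 else 0

-- reference decomposition of a list into maximal +1-runs
def runsSpec : List Int → List (List Int)
  | [] => []
  | v :: rest =>
      (v :: rest.take (chainLen v rest)) :: runsSpec (rest.drop (chainLen v rest))
termination_by l => l.length
decreasing_by
  simp

theorem chainLen_le (p : Int) (l : List Int) : chainLen p l ≤ l.length := by
  induction l generalizing p with
  | nil => simp [chainLen]
  | cons v rest ih =>
    simp only [chainLen]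
    split
    · have := ih v; simp; omega
    · simp

theorem drop_cons_getD (nums : List Int) (j : Nat) (hj : j < nums.length) :
    nums.drop j = nums.getD j 0 :: nums.drop (j+1) := by
  rw [List.getD_eq_getElem?_getD, List.getElem?_eq_getElem hj]
  exact List.drop_eq_getElem_cons hj

theorem scanRunA_eq (nums : List Int) (j : Nat) (h1 : 1 ≤ j) (h2 : j ≤ nums.length) :
    scanRunA nums j = j + chainLen (nums.getD (j - 1) 0) (nums.drop j) := by
  rw [scanRunA]
  by_cases hj : j < nums.length
  · by_cases hv : nums.getD j 0 = nums.getD (j - 1) 0 + 1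
    · rw [dif_pos ⟨hj, hv⟩, scanRunA_eq nums (j+1) (by omega) (by omega)]
      rw [drop_cons_getD nums j hj]
      simp only [chainLen, if_pos hv, Nat.add_sub_cancel]
      omega
    · rw [dif_neg (fun hcon => hv hcon.2)]
      rw [drop_cons_getD nums j hj]
      simp only [chainLen, if_neg hv]
      omega
  · have he : j = nums.length := by omega
    rw [dif_neg (by omega)]
    simp [he, List.drop_length, chainLen]
termination_by nums.length - j

theorem lastD_take (n : Nat) : ∀ (l : List Int) (v : Int), n ≤ l.length →
    (l.take n).getLastD v = (v :: l).getD n 0 := by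
  induction n with
  | zero => intro l v _; simp
  | succ n ih =>
    intro l v h
    cases l with
    | nil => simp at h
    | cons x l' =>
      rw [List.take_succ_cons, List.getLastD_cons, ih l' x (by simpa using h)]
      simp

theorem runsA_eq (chain : String) (nums : List Int) (i : Nat) (h : i ≤ nums.length) :
    runsA chain nums i = (runsSpec (nums.drop i)).map (fmtRunB chain) := by
  rw [runsA]
  by_cases hi : i < nums.length
  · rw [dif_pos hi]
    have hdrop := drop_cons_getD nums i hi
    have hlen : (nums.drop (i+1)).length = nums.length - (i+1) := by simp
    have hnle : chainLen (nums.getD i 0) (nums.drop (i+1)) ≤ (nums.drop (i+1)).length :=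
      chainLen_le _ _
    have hscan : scanRunA nums (i+1) = i + 1 + chainLen (nums.getD i 0) (nums.drop (i+1)) := by
      rw [scanRunA_eq nums (i+1) (by omega) (by omega)]
      simp
    have he : nums.getD (scanRunA nums (i+1) - 1) 0
        = (nums.getD i 0 :: (nums.drop (i+1)).take (chainLen (nums.getD i 0) (nums.drop (i+1)))).getLastD 0 := by
      rw [List.getLastD_cons, lastD_take _ _ _ hnle, ← hdrop, hscan]
      simp only [List.getD_eq_getElem?_getD, List.getElem?_drop]
      have : i + 1 + chainLen (nums[i]?.getD 0) (List.drop (i + 1) nums) - 1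
          = i + chainLen (nums[i]?.getD 0) (List.drop (i + 1) nums) := by omega
      rw [this]
    have htail : runsA chain nums (scanRunA nums (i+1))
        = (runsSpec ((nums.drop (i+1)).drop (chainLen (nums.getD i 0) (nums.drop (i+1))))).map (fmtRunB chain) := by
      rw [hscan, runsA_eq chain nums _ (by omega), List.drop_drop]
    rw [hdrop]
    simp only [runsSpec, List.map_cons]
    rw [he, htail]
    congr 1
  · rw [dif_neg hi]
    have he : i = nums.length := by omega
    simp [he, List.drop_length]
    simp [runsSpec]
termination_by nums.length - i

theorem gbAuxB_eq (rest : List Int) : ∀ (prev m : Int) (acc : List Int),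
    gbAuxB (prev - (m - 1)) acc (PySem.List.enumerate rest m) =
      (acc.reverse ++ rest.take (chainLen prev rest)) ::
        gbB (PySem.List.enumerate (rest.drop (chainLen prev rest)) (m + chainLen prev rest)) := by
  induction rest with
  | nil =>
    intro prev m acc
    simp [gbAuxB, gbB, chainLen, PySem.List.enumerate_nil]
  | cons v rest' ih =>
    intro prev m acc
    rw [PySem.List.enumerate_cons]
    have hiff : (v - m = prev - (m - 1)) ↔ (v = prev + 1) := by omega
    by_cases hv : v = prev + 1
    · simp only [gbAuxB, if_pos (hiff.mpr hv)]
      have hk : prev - (m - 1) = v - ((m + 1) - 1) := by omega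
      rw [hk, ih v (m + 1) (v :: acc)]
      simp only [chainLen, if_pos hv, List.take_succ_cons, List.drop_succ_cons,
        List.reverse_cons]
      have hm : m + ((chainLen v rest' + 1 : Nat) : Int)
          = (m + 1) + (chainLen v rest' : Int) := by push_cast; ring
      rw [hm]
      simp [List.append_assoc]
    · simp only [gbAuxB, if_neg (fun hcon => hv (hiff.mp hcon))]
      simp [chainLen, hv, gbB, PySem.List.enumerate_cons]

theorem gbB_eq (l : List Int) (m : Int) :
    gbB (PySem.List.enumerate l m) = runsSpec l := by
  match l with
  | [] => simp [gbB, runsSpec, PySem.List.enumerate_nil]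
  | v :: rest =>
    rw [PySem.List.enumerate_cons]
    simp only [gbB]
    have hk : v - m = v - ((m + 1) - 1) := by ring
    rw [hk, gbAuxB_eq rest v (m + 1) [v]]
    have hrec := gbB_eq (rest.drop (chainLen v rest)) ((m + 1) + (chainLen v rest : Nat))
    rw [hrec]
    simp [runsSpec]
termination_by l.length
decreasing_by
  simp

theorem per_chain (chain : String) (ns : List Int) :
    (gbB (PySem.List.enumerate (PySem.List.sorted ns (fun x => x) false) 0)).map (fmtRunB chain)
      = runsA chain (PySem.List.sorted ns (fun x => x) false) 0 := by
  rw [gbB_eq _ 0, runsA_eq chain _ 0 (Nat.zero_le _), List.drop_zero]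

theorem stepAB (d : PySem.Dict String (List Int)) (p : String × Int) :
    stepA (d.keys, d) p = ((stepB d p).keys, stepB d p) := by
  unfold stepA stepB
  by_cases hc : d.contains p.1
  · simp only [hc, if_true]
    rw [PySem.Dict.keys_insert_of_contains _ _ hc]
  · have hc' : d.contains p.1 = false := by simpa using hc
    simp only [hc', Bool.false_eq_true, if_false]
    have hd : d.getD p.1 [] = [] := by
      rw [PySem.Dict.getD, (PySem.Dict.get?_eq_none_iff_contains _ _).mpr hc']
      rfl
    rw [PySem.Dict.getD_insert_self, PySem.Dict.insert_insert_self, hd,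
        PySem.Dict.keys_insert_of_not_contains _ _ hc']

theorem foldAB (l : List (String × Int)) (d : PySem.Dict String (List Int)) :
    l.foldl stepA (d.keys, d) = ((l.foldl stepB d).keys, l.foldl stepB d) := by
  induction l generalizing d with
  | nil => rfl
  | cons p rest ih =>
    simp only [List.foldl_cons, stepAB d p]
    exact ih (stepB d p)

-- ===== VERDICT (by name: the statement is the Claim_ definition above) =====
theorem chain_aware_sele_spec : Claim_equal_chain_aware_sele := by
  intro residues _
  show chain_aware_sele residues = chain_aware_sele_alt residues
  by_cases h0 : residues = []
  · subst h0
    rfl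
  · simp only [chain_aware_sele, chain_aware_sele_alt, h0, if_false]
    have hkeys : (([] : List String), (PySem.Dict.empty : PySem.Dict String (List Int)))
        = ((PySem.Dict.empty : PySem.Dict String (List Int)).keys, PySem.Dict.empty) := by
      rw [PySem.Dict.keys_empty]
    rw [hkeys, foldAB residues PySem.Dict.empty]
    have hnd : (residues.foldl stepB PySem.Dict.empty).keys.Nodup := by
      have : residues.foldl stepB PySem.Dict.empty
          = residues.foldl (fun d x => d.insert x.1 (d.getD x.1 [] ++ [x.2])) PySem.Dict.empty := rfl
      rw [this]
      exact PySem.Dict.nodup_keys_foldl_insert_key residues Prod.fst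
        (fun d x => d.getD x.1 [] ++ [x.2]) PySem.Dict.empty PySem.Dict.nodup_keys_empty
    rw [PySem.Dict.items_eq_map_keys _ hnd []]
    rw [PySem.List.foldl_append_eq_flatMap, PySem.List.foldl_append_eq_flatMap]
    simp only [List.nil_append]
    congr 1
    rw [List.flatMap_map]
    refine List.flatMap_congr ?_
    intro c _
    exact (per_chain c _).symm
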